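-- pv_equiv track=rewrite | github.com/omkar211/DailyWork | Day6-Bit_Manipulation/xor_queries.py | find_xor
-- ===== SOURCE A (Python) =====
-- def find_xor(A,Q):
--     res=[]
--     for i in range(len(Q)):
--         zeroes=0
--         count_xor=0
--         for j in range(Q[i][0],Q[i][1]+1):
--             count_xor=count_xor^A[j]
--             if A[j]==0:
--               zeroes+=1
--         res.append([zeroes,count_xor])
--     return res
-- ===== SOURCE B (Python) =====
-- def find_xor(A, Q):
--     # Prefix XOR and prefix zero-count arrays; each query answered in O(1).
--     px = [0]
--     zc = [0]
--     for a in A: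
--         px.append(px[-1] ^ a)
--         zc.append(zc[-1] + (1 if a == 0 else 0))
--     res = []
--     for q in Q:
--         l = q[0]
--         r = q[1]
--         if l > r:
--             res.append([0, 0])
--         else:
--             res.append([zc[r + 1] - zc[l], px[r + 1] ^ px[l]])
--     return res
-- ===== Notes on version B (the rewrite author's own statement) =====
-- stated objective: alternative
-- what changed: Replaced the per-query scan over A[l..r] with prefix-XOR and prefix-zero-count tables built once, answering each query by two table lookups.
-- outside the precondition, e.g. on find_xor([1, 0], [[-2, 1]]): A returns [[2, 0]], B returns [[1, 0]]; on find_xor([5], [[0]]): A raises IndexError, B raises IndexError; on find_xor([5], [[0, 3]]): A raises IndexError, B raises IndexError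
import Mathlib
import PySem

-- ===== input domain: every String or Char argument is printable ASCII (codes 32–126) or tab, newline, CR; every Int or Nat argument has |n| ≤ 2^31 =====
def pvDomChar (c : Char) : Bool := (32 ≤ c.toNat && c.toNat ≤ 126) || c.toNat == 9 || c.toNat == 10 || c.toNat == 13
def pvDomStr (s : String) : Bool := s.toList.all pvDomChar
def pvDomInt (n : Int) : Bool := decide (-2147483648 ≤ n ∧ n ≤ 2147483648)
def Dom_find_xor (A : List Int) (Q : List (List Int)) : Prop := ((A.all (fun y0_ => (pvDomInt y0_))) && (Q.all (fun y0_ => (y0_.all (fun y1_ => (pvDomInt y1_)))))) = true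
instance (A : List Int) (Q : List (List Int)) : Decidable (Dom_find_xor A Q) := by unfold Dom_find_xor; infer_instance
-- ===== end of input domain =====

-- B replaces A's per-query scan of A[l..r] by prefix-XOR / prefix-zero-count tables built
-- once before the query loop, answering each query by two table lookups.

-- ===== PORT A =====
def find_xor (A : List Int) (Q : List (List Int)) : List (List Int) :=
  (PySem.List.pyRange 0 Q.length 1).foldl
    (fun res i =>
      let q := PySem.List.pyGetD Q i []
      let st := (PySem.List.pyRange (PySem.List.pyGetD q 0 0) (PySem.List.pyGetD q 1 0 + 1) 1).foldl
        (fun (st : Int × Int) j =>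
          (if PySem.List.pyGetD A j 0 = 0 then st.1 + 1 else st.1,
           PySem.Int.bxor st.2 (PySem.List.pyGetD A j 0))) (0, 0)
      res ++ [[st.1, st.2]]) []

-- ===== PORT B =====
def find_xor_alt (A : List Int) (Q : List (List Int)) : List (List Int) :=
  let pz := A.foldl (fun (p : List Int × List Int) a =>
      (p.1 ++ [PySem.Int.bxor (PySem.List.pyGetD p.1 (-1) 0) a],
       p.2 ++ [PySem.List.pyGetD p.2 (-1) 0 + (if a = 0 then 1 else 0)])) ([0], [0])
  Q.foldl (fun res q =>
      let l := PySem.List.pyGetD q 0 0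
      let r := PySem.List.pyGetD q 1 0
      if l > r then res ++ [[(0 : Int), 0]]
      else res ++ [[PySem.List.pyGetD pz.2 (r + 1) 0 - PySem.List.pyGetD pz.2 l 0,
                    PySem.Int.bxor (PySem.List.pyGetD pz.1 (r + 1) 0) (PySem.List.pyGetD pz.1 l 0)]]) []

-- ===== PRECONDITION & SPEC =====
-- Pre_ excludes queries with fewer than two entries or with a non-empty range [l, r] that
-- leaves [0, len(A)): there A raises IndexError or relies on accidental negative-index
-- wraparound (an artefact of A's implementation), where B's prefix arrays index differently.
def Pre_find_xor (A : List Int) (Q : List (List Int)) : Prop :=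
  ∀ q ∈ Q, 2 ≤ q.length ∧
    (q.getD 0 0 ≤ q.getD 1 0 → 0 ≤ q.getD 0 0 ∧ q.getD 1 0 < (A.length : Int))
instance (A : List Int) (Q : List (List Int)) : Decidable (Pre_find_xor A Q) := by unfold Pre_find_xor; infer_instance

def pvWitness_find_xor : List Int × List (List Int) := ([3, 0, 5], [[0, 2], [1, 1], [2, 0]])

def Spec_find_xor (A : List Int) (Q : List (List Int)) (out : List (List Int)) : Prop := out = find_xor_alt A Q
instance (A : List Int) (Q : List (List Int)) (out : List (List Int)) : Decidable (Spec_find_xor A Q out) := by unfold Spec_find_xor; infer_instance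

-- ===== CLAIM (what is proved, stated in full; the proofs are below) =====
def Claim_equal_find_xor : Prop := ∀ (A : List Int) (Q : List (List Int)), Dom_find_xor A Q → Pre_find_xor A Q → Spec_find_xor A Q (find_xor A Q)

-- ===== LEMMAS AND PROOFS =====

-- xor algebra for PySem.Int.bxor via the (sign, magnitude-bits) encoding
def pvU (a : Int) : Nat := if 0 ≤ a then a.toNat else (-a - 1).toNat
def pvEnc (s : Bool) (n : Nat) : Int := if s then -(n : Int) - 1 else (n : Int)

theorem pvEnc_neg (s : Bool) (n : Nat) : decide (pvEnc s n < 0) = s := by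
  cases s <;> simp [pvEnc] <;> omega

theorem pvU_enc (s : Bool) (n : Nat) : pvU (pvEnc s n) = n := by
  cases s <;> simp [pvEnc, pvU] <;> omega

theorem bxor_enc (a b : Int) :
    PySem.Int.bxor a b = pvEnc ((a < 0) != (b < 0)) (pvU a ^^^ pvU b) := by
  unfold PySem.Int.bxor pvEnc pvU
  rcases le_or_gt 0 a with ha | ha <;> rcases le_or_gt 0 b with hb | hb <;>
    simp [ha, hb, not_le.mpr] <;> omega

theorem bxor_assoc' (a b c : Int) :
    PySem.Int.bxor (PySem.Int.bxor a b) c = PySem.Int.bxor a (PySem.Int.bxor b c) := by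
  simp only [bxor_enc, pvEnc_neg, pvU_enc, Nat.xor_assoc, Bool.xor_assoc]

theorem bxor_left_comm (a b c : Int) :
    PySem.Int.bxor a (PySem.Int.bxor b c) = PySem.Int.bxor b (PySem.Int.bxor a c) := by
  rw [← bxor_assoc', PySem.Int.bxor_comm a b, bxor_assoc']

theorem bxor_zero_left (a : Int) : PySem.Int.bxor 0 a = a := by
  rw [PySem.Int.bxor_comm, PySem.Int.bxor_zero]

theorem bxor_cancel_left (a b : Int) : PySem.Int.bxor a (PySem.Int.bxor a b) = b := by
  rw [← bxor_assoc', PySem.Int.bxor_self, bxor_zero_left]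

-- prefix quantities
def pvPxor (A : List Int) (k : Nat) : Int := (A.take k).foldl PySem.Int.bxor 0
def pvZcnt (A : List Int) (k : Nat) : Int := ((A.take k).countP (fun a => a == 0) : Int)

theorem pvPxor_prefix (A : List Int) (a : Int) (k : Nat) (hk : k ≤ A.length) :
    pvPxor (A ++ [a]) k = pvPxor A k := by
  unfold pvPxor; rw [List.take_append_of_le_length hk]

theorem pvZcnt_prefix (A : List Int) (a : Int) (k : Nat) (hk : k ≤ A.length) :
    pvZcnt (A ++ [a]) k = pvZcnt A k := by
  unfold pvZcnt; rw [List.take_append_of_le_length hk]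

theorem pvPxor_snoc (A : List Int) (a : Int) :
    pvPxor (A ++ [a]) (A.length + 1) = PySem.Int.bxor (pvPxor A A.length) a := by
  unfold pvPxor
  rw [List.take_of_length_le (by simp), List.take_of_length_le (le_refl _), List.foldl_append]
  rfl

theorem pvZcnt_snoc (A : List Int) (a : Int) :
    pvZcnt (A ++ [a]) (A.length + 1) = pvZcnt A A.length + (if a = 0 then 1 else 0) := by
  unfold pvZcnt
  rw [List.take_of_length_le (by simp), List.take_of_length_le (le_refl _), List.countP_append]
  by_cases h : a = 0 <;> simp [h]

theorem pvZcnt_succ (A : List Int) (k : Nat) (hk : k < A.length) :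
    pvZcnt A (k + 1) = pvZcnt A k + (if A[k] = 0 then 1 else 0) := by
  unfold pvZcnt
  rw [List.take_succ, List.getElem?_eq_getElem hk]
  simp only [Option.toList_some, List.countP_append]
  by_cases h : A[k] = 0 <;> simp [h]

theorem pvPxor_succ (A : List Int) (k : Nat) (hk : k < A.length) :
    pvPxor A (k + 1) = PySem.Int.bxor (pvPxor A k) A[k] := by
  unfold pvPxor
  rw [List.take_succ, List.getElem?_eq_getElem hk]
  simp only [Option.toList_some, List.foldl_append]
  rfl

-- B's prefix-building loop produces exactly the prefix tables
theorem build_eq (A : List Int) :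
    A.foldl (fun (p : List Int × List Int) a =>
      (p.1 ++ [PySem.Int.bxor (PySem.List.pyGetD p.1 (-1) 0) a],
       p.2 ++ [PySem.List.pyGetD p.2 (-1) 0 + (if a = 0 then 1 else 0)])) ([0], [0])
    = ((List.range (A.length + 1)).map (pvPxor A), (List.range (A.length + 1)).map (pvZcnt A)) := by
  induction A using List.reverseRecOn with
  | nil => simp [List.range_succ, pvPxor, pvZcnt]
  | append_singleton A a ih =>
      rw [List.foldl_append, ih]
      simp only [List.foldl_cons, List.foldl_nil]
      have hx : (List.range (A.length + 1)).map (pvPxor A)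
          = (List.range A.length).map (pvPxor A) ++ [pvPxor A A.length] := by
        rw [List.range_succ, List.map_append]; rfl
      have hz : (List.range (A.length + 1)).map (pvZcnt A)
          = (List.range A.length).map (pvZcnt A) ++ [pvZcnt A A.length] := by
        rw [List.range_succ, List.map_append]; rfl
      rw [hx, hz, PySem.List.pyGetD_neg_one_append_singleton, PySem.List.pyGetD_neg_one_append_singleton]
      have hlen : (A ++ [a]).length = A.length + 1 := by simp
      rw [hlen]
      have hmx : (List.range (A.length + 1)).map (pvPxor (A ++ [a]))
          = (List.range (A.length + 1)).map (pvPxor A) := by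
        apply List.map_congr_left
        intro k hk
        exact pvPxor_prefix A a k (Nat.lt_succ_iff.mp (List.mem_range.mp hk))
      have hmz : (List.range (A.length + 1)).map (pvZcnt (A ++ [a]))
          = (List.range (A.length + 1)).map (pvZcnt A) := by
        apply List.map_congr_left
        intro k hk
        exact pvZcnt_prefix A a k (Nat.lt_succ_iff.mp (List.mem_range.mp hk))
      have e1 : (List.range (A.length + 1 + 1)).map (pvPxor (A ++ [a]))
          = (List.range (A.length + 1)).map (pvPxor A) ++ [PySem.Int.bxor (pvPxor A A.length) a] := by
        rw [List.range_succ, List.map_append, hmx]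
        simp [pvPxor_snoc]
      have e2 : (List.range (A.length + 1 + 1)).map (pvZcnt (A ++ [a]))
          = (List.range (A.length + 1)).map (pvZcnt A) ++ [pvZcnt A A.length + (if a = 0 then 1 else 0)] := by
        rw [List.range_succ, List.map_append, hmz]
        simp [pvZcnt_snoc]
      rw [Prod.mk.injEq]
      refine ⟨?_, ?_⟩
      · rw [e1, hx, List.append_assoc]
      · rw [e2, hz, List.append_assoc]

-- A's inner loop over [l, m) equals the prefix-table difference
theorem inner_eq (A : List Int) (l m : Int) (h0 : 0 ≤ l) (hm : m ≤ (A.length : Int))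
    (hlm : l ≤ m) (z x : Int) :
    (PySem.List.pyRange l m 1).foldl
      (fun (st : Int × Int) j =>
        (if PySem.List.pyGetD A j 0 = 0 then st.1 + 1 else st.1,
         PySem.Int.bxor st.2 (PySem.List.pyGetD A j 0))) (z, x)
    = (z + (pvZcnt A m.toNat - pvZcnt A l.toNat),
       PySem.Int.bxor x (PySem.Int.bxor (pvPxor A m.toNat) (pvPxor A l.toNat))) := by
  induction h : (m - l).toNat generalizing l z x with
  | zero =>
      have hml : m = l := by omega
      subst hml
      rw [PySem.List.pyRange_one_eq_nil (le_refl _)]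
      simp [PySem.Int.bxor_self, PySem.Int.bxor_zero]
  | succ n ih =>
      have hlt : l < m := by omega
      rw [PySem.List.pyRange_one_cons hlt, List.foldl_cons]
      have hget : PySem.List.pyGetD A l 0 = A[l.toNat] :=
        PySem.List.pyGetD_eq_getElem A (i := l) 0 h0 (by omega)
      have hrec := ih (l + 1) (by omega) (by omega)
        (if PySem.List.pyGetD A l 0 = 0 then z + 1 else z)
        (PySem.Int.bxor x (PySem.List.pyGetD A l 0)) (by omega)
      rw [hrec]
      have hl1 : (l + 1).toNat = l.toNat + 1 := by omega
      have hltn : l.toNat < A.length := by omega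
      rw [hl1, pvZcnt_succ A l.toNat hltn, pvPxor_succ A l.toNat hltn, hget]
      rw [Prod.mk.injEq]
      refine ⟨?_, ?_⟩
      · by_cases h0' : A[l.toNat] = 0 <;> simp [h0'] <;> ring
      · rw [PySem.Int.bxor_comm (pvPxor A l.toNat) (A[l.toNat])]
        simp only [bxor_assoc', bxor_left_comm, bxor_cancel_left]

-- per-query agreement, then fold the two result-building loops together
theorem query_eq (A : List Int) (q : List Int) (hq : 2 ≤ q.length)
    (hr : q.getD 0 0 ≤ q.getD 1 0 → 0 ≤ q.getD 0 0 ∧ q.getD 1 0 < (A.length : Int)) :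
    (let st := (PySem.List.pyRange (PySem.List.pyGetD q 0 0) (PySem.List.pyGetD q 1 0 + 1) 1).foldl
        (fun (st : Int × Int) j =>
          (if PySem.List.pyGetD A j 0 = 0 then st.1 + 1 else st.1,
           PySem.Int.bxor st.2 (PySem.List.pyGetD A j 0))) ((0 : Int), (0 : Int))
     [[st.1, st.2]])
    = (let pz := ((List.range (A.length + 1)).map (pvPxor A), (List.range (A.length + 1)).map (pvZcnt A))
       let l := PySem.List.pyGetD q 0 0
       let r := PySem.List.pyGetD q 1 0
       if l > r then [[(0 : Int), 0]]
       else [[PySem.List.pyGetD pz.2 (r + 1) 0 - PySem.List.pyGetD pz.2 l 0,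
              PySem.Int.bxor (PySem.List.pyGetD pz.1 (r + 1) 0) (PySem.List.pyGetD pz.1 l 0)]]) := by
  have h0 : PySem.List.pyGetD q 0 0 = q.getD 0 0 := PySem.List.pyGetD_zero q 0
  have h1 : PySem.List.pyGetD q 1 0 = q.getD 1 0 := by
    rw [PySem.List.pyGetD_eq_getElem q (i := 1) 0 (by omega) (by push_cast; omega),
        List.getD_eq_getElem _ _ (by omega)]
    rfl
  by_cases hgt : PySem.List.pyGetD q 0 0 > PySem.List.pyGetD q 1 0
  · rw [if_pos hgt]
    rw [PySem.List.pyRange_one_eq_nil (by omega)]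
    simp
  · rw [if_neg hgt]
    push_neg at hgt
    obtain ⟨hl0, hrlen⟩ := hr (by rw [← h0, ← h1]; exact hgt)
    rw [← h0] at hl0
    rw [← h1] at hrlen
    set l := PySem.List.pyGetD q 0 0 with hldef
    set r := PySem.List.pyGetD q 1 0 with hrdef
    have hinner := inner_eq A l (r + 1) hl0 (by omega) (by omega) 0 0
    simp only [hinner]
    have hmaplen : ∀ f : Nat → Int, ((List.range (A.length + 1)).map f).length = A.length + 1 := by
      intro f; simp
    have hgetmap : ∀ (f : Nat → Int) (i : Int), 0 ≤ i → i < (A.length : Int) + 1 →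
        PySem.List.pyGetD ((List.range (A.length + 1)).map f) i 0 = f i.toNat := by
      intro f i hi hilt
      have heq := PySem.List.pyGetD_eq_getElem ((List.range (A.length + 1)).map f) (i := i) 0 hi
        (by rw [hmaplen]; push_cast; omega)
      rw [heq, List.getElem_map, List.getElem_range]
    rw [hgetmap _ (r + 1) (by omega) (by omega), hgetmap _ l (by omega) (by omega),
        hgetmap _ (r + 1) (by omega) (by omega), hgetmap _ l (by omega) (by omega)]
    simp [bxor_zero_left, PySem.Int.bxor_comm (pvPxor A (r+1).toNat) (pvPxor A l.toNat)]

theorem fold_eq (A : List Int) (Q : List (List Int)) (hQ : Pre_find_xor A Q) (res : List (List Int)) :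
    Q.foldl (fun res q =>
      let st := (PySem.List.pyRange (PySem.List.pyGetD q 0 0) (PySem.List.pyGetD q 1 0 + 1) 1).foldl
        (fun (st : Int × Int) j =>
          (if PySem.List.pyGetD A j 0 = 0 then st.1 + 1 else st.1,
           PySem.Int.bxor st.2 (PySem.List.pyGetD A j 0))) (0, 0)
      res ++ [[st.1, st.2]]) res
    = Q.foldl (fun res q =>
      let pz := ((List.range (A.length + 1)).map (pvPxor A), (List.range (A.length + 1)).map (pvZcnt A))
      let l := PySem.List.pyGetD q 0 0
      let r := PySem.List.pyGetD q 1 0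
      if l > r then res ++ [[(0 : Int), 0]]
      else res ++ [[PySem.List.pyGetD pz.2 (r + 1) 0 - PySem.List.pyGetD pz.2 l 0,
                    PySem.Int.bxor (PySem.List.pyGetD pz.1 (r + 1) 0) (PySem.List.pyGetD pz.1 l 0)]]) res := by
  induction Q generalizing res with
  | nil => rfl
  | cons q Q ih =>
      obtain ⟨hq, hr⟩ := hQ q (List.mem_cons_self)
      have hstep := query_eq A q hq hr
      simp only [List.foldl_cons]
      have hQ' : Pre_find_xor A Q := fun p hp => hQ p (List.mem_cons_of_mem _ hp)
      by_cases hgt : PySem.List.pyGetD q 0 0 > PySem.List.pyGetD q 1 0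
      · simp only [if_pos hgt] at hstep ⊢
        rw [ih hQ', hstep]
      · simp only [if_neg hgt] at hstep ⊢
        rw [ih hQ', hstep]

-- ===== VERDICT (by name: the statement is the Claim_ definition above) =====
theorem find_xor_spec : Claim_equal_find_xor := by
  intro A Q _hdom hpre
  unfold Spec_find_xor find_xor find_xor_alt
  rw [build_eq]
  exact Eq.trans
    (PySem.List.foldl_pyRange_zero_pyGetD Q ([] : List Int)
      (fun res q =>
        let st := (PySem.List.pyRange (PySem.List.pyGetD q 0 0) (PySem.List.pyGetD q 1 0 + 1) 1).foldl
          (fun (st : Int × Int) j =>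
            (if PySem.List.pyGetD A j 0 = 0 then st.1 + 1 else st.1,
             PySem.Int.bxor st.2 (PySem.List.pyGetD A j 0))) (0, 0)
        res ++ [[st.1, st.2]]) ([] : List (List Int)))
    (fold_eq A Q hpre [])
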